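-- pv_equiv track=rewrite | github.com/paulgr98/aoc2022 | Day8/day8.py | find_trees_right_for_row_number
-- ===== SOURCE A (Python) =====
-- def find_trees_right_for_row_number(row: list, row_number) -> list:
--     visible_trees = []
--     highest_tree = max(row[1:-1])
--     last_tree = row[-1]
--     for index in range(len(row) - 2, 0, -1):
--         if row[index] > last_tree:
--             visible_trees.append((row_number, index))
--             last_tree = row[index]
--         if row[index] == highest_tree:
--             break
--     return visible_trees
-- ===== SOURCE B (Python) =====
-- def find_trees_right_for_row_number(row: list, row_number) -> list:
--     # Two-pass: precompute suffix maxima, then collect interior indices whose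
--     # tree is strictly taller than everything to its right.
--     n = len(row)
--     suf = row[:]  # suf[i] becomes max(row[i:])
--     for i in range(n - 2, -1, -1):
--         suf[i] = max(suf[i], suf[i + 1])
--     return [(row_number, i) for i in range(n - 2, 0, -1) if row[i] > suf[i + 1]]
-- ===== Notes on version B (the rewrite author's own statement) =====
-- stated objective: alternative
-- what changed: Replaces A's single running-max loop with early break by a precomputed suffix-maximum table plus a separate collection pass comparing each interior tree against the max of its strict-right suffix.
import Mathlib
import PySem

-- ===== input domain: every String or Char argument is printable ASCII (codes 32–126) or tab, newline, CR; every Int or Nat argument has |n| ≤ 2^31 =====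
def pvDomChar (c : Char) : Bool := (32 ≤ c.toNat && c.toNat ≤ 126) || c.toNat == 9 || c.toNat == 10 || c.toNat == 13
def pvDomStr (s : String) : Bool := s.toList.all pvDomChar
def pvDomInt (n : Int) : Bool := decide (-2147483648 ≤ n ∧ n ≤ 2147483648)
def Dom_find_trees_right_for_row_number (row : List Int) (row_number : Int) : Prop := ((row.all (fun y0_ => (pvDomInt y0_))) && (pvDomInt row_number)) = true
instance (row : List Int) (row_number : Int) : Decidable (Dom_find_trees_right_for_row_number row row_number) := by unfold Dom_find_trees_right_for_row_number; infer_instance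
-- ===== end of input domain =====

-- B replaces A's single running-max loop with early break by a precomputed
-- suffix-maximum table plus a separate collection pass (alternative decomposition, same cost).

-- ===== PORT A =====
-- A's for-loop over range(len(row)-2, 0, -1) with running max `last` and break at the interior maximum
def pvALoop (row : List Int) (row_number highest : Int) :
    List Int → Int → List (Int × Int) → List (Int × Int)
  | [], _, acc => acc
  | i :: rest, last, acc =>
    let v := PySem.List.pyGetD row i 0   -- index always in range on this loop's indices
    let acc' := if v > last then acc ++ [(row_number, i)] else acc
    let last' := if v > last then v else last
    if v = highest then acc' else pvALoop row row_number highest rest last' acc'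

def find_trees_right_for_row_number (row : List Int) (row_number : Int) : List (Int × Int) :=
  match PySem.List.max? (PySem.List.slice row (some 1) (some (-1))) (fun x => x) with
  | none => []   -- Python: max([]) raises ValueError (len(row) ≤ 2); excluded by Pre_
  | some highest =>
    match PySem.List.pyGet? row (-1) with
    | none => []  -- Python: IndexError on empty row; excluded by Pre_
    | some last =>
      pvALoop row row_number highest
        (PySem.List.pyRange ((row.length : Int) - 2) 0 (-1)) last []

-- ===== PORT B =====
-- Source B's right-to-left in-place pass turning a copy of row into suffix maxima: suf[i] = max(row[i:])
def pvSufMax : List Int → List Int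
  | [] => []
  | x :: rest =>
    match pvSufMax rest with
    | [] => [x]
    | y :: t => max x y :: y :: t

def find_trees_right_for_row_number_alt (row : List Int) (row_number : Int) : List (Int × Int) :=
  let suf := pvSufMax row
  (PySem.List.pyRange ((row.length : Int) - 2) 0 (-1)).filterMap (fun i =>
    if PySem.List.pyGetD row i 0 > PySem.List.pyGetD suf (i + 1) 0 then some (row_number, i)
    else none)

-- ===== PRECONDITION & SPEC =====
-- Pre_ excludes exactly the rows of length < 3, on which A raises ValueError (max of the empty interior slice row[1:-1]).
def Pre_find_trees_right_for_row_number (row : List Int) (row_number : Int) : Prop :=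
  3 ≤ row.length
instance (row : List Int) (row_number : Int) : Decidable (Pre_find_trees_right_for_row_number row row_number) := by unfold Pre_find_trees_right_for_row_number; infer_instance
def pvWitness_find_trees_right_for_row_number : List Int × Int := ([3, 1, 2], 0)

def Spec_find_trees_right_for_row_number (row : List Int) (row_number : Int) (out : List (Int × Int)) : Prop := out = find_trees_right_for_row_number_alt row row_number
instance (row : List Int) (row_number : Int) (out : List (Int × Int)) : Decidable (Spec_find_trees_right_for_row_number row row_number out) := by unfold Spec_find_trees_right_for_row_number; infer_instance

-- ===== CLAIM (what is proved, stated in full; the proofs are below) =====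
def Claim_equal_find_trees_right_for_row_number : Prop := ∀ (row : List Int) (row_number : Int), Dom_find_trees_right_for_row_number row row_number → Pre_find_trees_right_for_row_number row row_number → Spec_find_trees_right_for_row_number row row_number (find_trees_right_for_row_number row row_number)

-- ===== LEMMAS AND PROOFS =====

-- max of the suffix row[i:] (0 for the empty suffix, never used there)
def pvSfx (row : List Int) (i : Nat) : Int :=
  match row.drop i with
  | [] => 0
  | y :: t => t.foldl max y

theorem pv_foldl_max_comm (t : List Int) : ∀ x y : Int, t.foldl max (max x y) = max x (t.foldl max y) := by
  induction t with
  | nil => intro x y; simp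
  | cons a t ih =>
    intro x y
    simp only [List.foldl_cons]
    rw [max_assoc, ih]

theorem pvSufMax_cons (x : Int) (xs : List Int) :
    pvSufMax (x :: xs) = (xs.foldl max x) :: pvSufMax xs := by
  induction xs generalizing x with
  | nil => simp [pvSufMax]
  | cons y t ih =>
    have h := ih y
    simp only [pvSufMax] at h ⊢
    rw [h]
    simp only [List.foldl_cons]
    rw [pv_foldl_max_comm]

theorem pvSufMax_getD (row : List Int) : ∀ (i : Nat), i < row.length →
    (pvSufMax row).getD i 0 = pvSfx row i := by
  induction row with
  | nil => intro i h; simp at h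
  | cons x xs ih =>
    intro i h
    rw [pvSufMax_cons]
    cases i with
    | zero => simp [pvSfx]
    | succ j =>
      simp only [List.getD_cons_succ]
      rw [ih j (by simpa using h)]
      simp [pvSfx]

theorem pvSfx_cons (row : List Int) (k : Nat) (h : k + 1 < row.length) :
    pvSfx row k = max (row.getD k 0) (pvSfx row (k + 1)) := by
  have hk : k < row.length := by omega
  have hd : row.drop k = row[k] :: row.drop (k + 1) := List.drop_eq_getElem_cons hk
  have hd2 : row.drop (k + 1) = row[k+1] :: row.drop (k + 2) := List.drop_eq_getElem_cons h
  simp only [pvSfx, hd, hd2, List.foldl_cons]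
  rw [List.getD_eq_getElem row 0 hk]
  rw [pv_foldl_max_comm]

theorem pvSfx_mem_le (row : List Int) (i k : Nat) (h1 : i ≤ k) (h2 : k < row.length) :
    row.getD k 0 ≤ pvSfx row i := by
  have hki : k - i < (row.drop i).length := by simp; omega
  have he : (row.drop i)[k - i] = row[k] := by
    rw [List.getElem_drop]; congr 1; omega
  have hmem : row[k] ∈ row.drop i := by rw [← he]; exact List.getElem_mem hki
  rw [List.getD_eq_getElem row 0 h2]
  cases hdr : row.drop i with
  | nil => rw [hdr] at hmem; simp at hmem
  | cons y t =>
    rw [hdr] at hmem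
    simp only [pvSfx, hdr]
    rcases List.mem_cons.mp hmem with h | h
    · rw [h]; exact (PySem.List.le_foldl_max t y).1
    · exact (PySem.List.le_foldl_max t y).2 _ h

-- the interior slice row[1:-1] as drop/take, for 3 ≤ len
theorem pv_slice_interior (row : List Int) (h : 3 ≤ row.length) :
    PySem.List.slice row (some 1) (some (-1)) = (row.drop 1).take (row.length - 2) := by
  have h1 : PySem.List.slice row (some 1) (some (-1)) = (row.drop (PySem.List.clampIdx row.length 1)).take (PySem.List.clampIdx row.length (-1) - PySem.List.clampIdx row.length 1) := by
    simp [PySem.List.slice]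
  rw [h1]
  have hne : row ≠ [] := by intro e; subst e; simp at h
  have c1 : PySem.List.clampIdx row.length 1 = 1 := by
    simp [PySem.List.clampIdx]; omega
  have c2 : PySem.List.clampIdx row.length (-1) = row.length - 1 := by
    simp [PySem.List.clampIdx, hne]; omega
  rw [c1, c2]
  congr 1

theorem pv_mem_interior (row : List Int) (h : 3 ≤ row.length) (j : Nat)
    (hj1 : 1 ≤ j) (hj2 : j + 1 < row.length) :
    row.getD j 0 ∈ (row.drop 1).take (row.length - 2) := by
  have hjlen : j < row.length := by omega
  have hidx : j - 1 < ((row.drop 1).take (row.length - 2)).length := by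
    simp; omega
  have he : ((row.drop 1).take (row.length - 2))[j - 1] = row[j] := by
    rw [List.getElem_take, List.getElem_drop]; congr 1; omega
  rw [List.getD_eq_getElem row 0 hjlen, ← he]
  exact List.getElem_mem hidx

-- the core loop invariant: with `last = pvSfx row (k+1)`, A's loop produces exactly B's filterMap
theorem pvALoop_eq (row : List Int) (rn highest : Int)
    (hhi : ∀ j : Nat, 1 ≤ j → j + 1 < row.length → row.getD j 0 ≤ highest) :
    ∀ (k : Nat), k + 1 < row.length → ∀ (acc : List (Int × Int)),
      pvALoop row rn highest (PySem.List.pyRange (k : Int) 0 (-1)) (pvSfx row (k + 1)) acc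
        = acc ++ (PySem.List.pyRange (k : Int) 0 (-1)).filterMap (fun i =>
            if PySem.List.pyGetD row i 0 > PySem.List.pyGetD (pvSufMax row) (i + 1) 0
            then some (rn, i) else none) := by
  intro k
  induction k with
  | zero =>
    intro _ acc
    rw [PySem.List.pyRange_neg_one_eq_nil (by norm_num)]
    simp [pvALoop]
  | succ m ih =>
    intro hk acc
    have hcons : PySem.List.pyRange ((m + 1 : Nat) : Int) 0 (-1)
        = ((m + 1 : Nat) : Int) :: PySem.List.pyRange ((m : Nat) : Int) 0 (-1) := by
      have := PySem.List.pyRange_neg_one_cons (a := ((m + 1 : Nat) : Int)) (b := 0) (by push_cast; omega)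
      rw [this]; congr 1; push_cast; ring_nf
    -- the three index accesses at the head, as getD on Nat indices
    have hv : PySem.List.pyGetD row ((m + 1 : Nat) : Int) 0 = row.getD (m + 1) 0 :=
      PySem.List.pyGetD_natCast row (m + 1) 0
    have hsuf : PySem.List.pyGetD (pvSufMax row) (((m + 1 : Nat) : Int) + 1) 0 = pvSfx row (m + 2) := by
      have : (((m + 1 : Nat) : Int) + 1) = ((m + 2 : Nat) : Int) := by push_cast; ring
      rw [this, PySem.List.pyGetD_natCast]
      exact pvSufMax_getD row (m + 2) (by omega)
    rw [hcons]
    simp only [pvALoop, List.filterMap_cons]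
    rw [hv, hsuf]
    simp only [show m + 1 + 1 = m + 2 from rfl]
    by_cases hbr : row.getD (m + 1) 0 = highest
    · -- break: the rest of B's filterMap is empty
      have hrest : (PySem.List.pyRange ((m : Nat) : Int) 0 (-1)).filterMap (fun i =>
          if PySem.List.pyGetD row i 0 > PySem.List.pyGetD (pvSufMax row) (i + 1) 0
          then some (rn, i) else none) = [] := by
        rw [List.filterMap_eq_nil_iff]
        intro i hi
        have hmem := PySem.List.mem_pyRange_neg_one.mp hi
        have h0 : 0 < i := hmem.1
        have hle : i ≤ ((m : Nat) : Int) := hmem.2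
        set j := i.toNat with hj
        have hij : i = (j : Int) := by omega
        have hj1 : 1 ≤ j := by omega
        have hjm : j ≤ m := by omega
        have hiv : PySem.List.pyGetD row i 0 = row.getD j 0 := by
          rw [hij, PySem.List.pyGetD_natCast]
        have hisuf : PySem.List.pyGetD (pvSufMax row) (i + 1) 0 = pvSfx row (j + 1) := by
          have : i + 1 = ((j + 1 : Nat) : Int) := by push_cast; omega
          rw [this, PySem.List.pyGetD_natCast]
          exact pvSufMax_getD row (j + 1) (by omega)
        rw [hiv, hisuf]
        have hle1 : row.getD j 0 ≤ highest := hhi j hj1 (by omega)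
        have hle2 : highest ≤ pvSfx row (j + 1) := by
          rw [← hbr]
          exact pvSfx_mem_le row (j + 1) (m + 1) (by omega) (by omega)
        simp only [ite_eq_right_iff]
        intro hgt
        omega
      rw [if_pos hbr, hrest]
      by_cases hc : row.getD (m + 1) 0 > pvSfx row (m + 2)
      · simp only [if_pos hc]
      · simp only [if_neg hc]; simp
    · -- no break: recurse with last' = pvSfx row (m+1)
      rw [if_neg hbr]
      by_cases hc : row.getD (m + 1) 0 > pvSfx row (m + 2)
      · have hl : row.getD (m + 1) 0 = pvSfx row (m + 1) := by
          rw [pvSfx_cons row (m + 1) hk, max_eq_left (le_of_lt hc)]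
        simp only [if_pos hc]
        rw [hl, ih (by omega) (acc ++ [(rn, ((m + 1 : Nat) : Int))])]
        simp
      · have hl : pvSfx row (m + 2) = pvSfx row (m + 1) := by
          rw [pvSfx_cons row (m + 1) hk, max_eq_right (not_lt.mp hc)]
        simp only [if_neg hc]
        rw [hl, ih (by omega) acc]

-- ===== VERDICT (by name: the statement is the Claim_ definition above) =====
theorem find_trees_right_for_row_number_spec : Claim_equal_find_trees_right_for_row_number := by
  intro row rn _ hpre
  unfold Pre_find_trees_right_for_row_number at hpre
  unfold Spec_find_trees_right_for_row_number
  unfold find_trees_right_for_row_number find_trees_right_for_row_number_alt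
  have hslice := pv_slice_interior row hpre
  -- the interior slice is nonempty, so max? is some
  have hne : PySem.List.slice row (some 1) (some (-1)) ≠ [] := by
    rw [hslice]
    intro hnil
    have := congrArg List.length hnil
    simp at this
    omega
  cases hmax : PySem.List.max? (PySem.List.slice row (some 1) (some (-1))) (fun x => x) with
  | none => exact absurd ((PySem.List.max?_eq_none_iff _ _).mp hmax) hne
  | some highest =>
    have hrow_ne : row ≠ [] := by intro h; rw [h] at hpre; simp at hpre
    have hlastIdx : row.length - 1 < row.length := by omega
    have hget : PySem.List.pyGet? row (-1) = some row[row.length - 1] := by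
      rw [PySem.List.pyGet?_neg_one, List.getLast?_eq_getElem?]
      simp
    rw [hget]
    have hhi : ∀ j : Nat, 1 ≤ j → j + 1 < row.length → row.getD j 0 ≤ highest := by
      intro j hj1 hj2
      have hmem := pv_mem_interior row hpre j hj1 hj2
      rw [← hslice] at hmem
      exact PySem.List.max?_isMax hmax _ hmem
    have hcast : ((row.length : Int) - 2) = ((row.length - 2 : Nat) : Int) := by omega
    have hlastSfx : row[row.length - 1] = pvSfx row (row.length - 1) := by
      have hd : row.drop (row.length - 1) = row[row.length - 1] :: row.drop (row.length - 1 + 1) :=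
        List.drop_eq_getElem_cons hlastIdx
      have hd2 : row.drop (row.length - 1 + 1) = [] := List.drop_eq_nil_of_le (by omega)
      simp [pvSfx, hd, hd2]
    have hk : (row.length - 2) + 1 < row.length := by omega
    have hkk : (row.length - 2) + 1 = row.length - 1 := by omega
    rw [hcast]
    calc pvALoop row rn highest (PySem.List.pyRange ((row.length - 2 : Nat) : Int) 0 (-1)) row[row.length - 1] []
        = pvALoop row rn highest (PySem.List.pyRange ((row.length - 2 : Nat) : Int) 0 (-1)) (pvSfx row ((row.length - 2) + 1)) [] := by
          rw [hkk, hlastSfx]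
      _ = (PySem.List.pyRange ((row.length - 2 : Nat) : Int) 0 (-1)).filterMap (fun i =>
            if PySem.List.pyGetD row i 0 > PySem.List.pyGetD (pvSufMax row) (i + 1) 0
            then some (rn, i) else none) := by
          rw [pvALoop_eq row rn highest hhi (row.length - 2) hk []]
          simp
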